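-- pv_equiv track=rewrite | github.com/pypi-data/pypi-mirror-351 | packages/docvault/docvault-0.6.0.tar.gz/docvault-0.6.0/docvault/project.py | parse_requirements_txt
-- ===== SOURCE A (Python) =====
-- from typing import Dict, List, Optional, TypedDict, Union
--
-- class Dependency(TypedDict):
--     """Represents a project dependency with name and version information."""
--
--     name: str
--     version: str
--     source_file: str
--
-- def parse_requirements_txt(content: str) -> List[Dependency]:
--     """Parse Python requirements.txt file.
--
--     Args:
--         content: Contents of the requirements.txt file
--
--     Returns:
--         List of Dependency objects with name and version information
--
--     Note:
--         Handles various version specifiers: ==, >=, <=, >, <, ~=, !=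
--         Also handles comments and -r includes (recursively)
--     """
--     deps = []
--     for line in content.split("\n"):
--         line = line.strip()
--         if not line or line.startswith("#"):
--             continue
--
--         # Handle -r requirements.txt includes
--         if line.startswith("-r "):
--             # TODO: Handle includes recursively
--             continue
--
--         # Remove any trailing comments
--         line = line.split("#", 1)[0].strip()
--         if not line:
--             continue
--
--         # Handle different version specifiers
--         version = ""
--         pkg = line
--
--         # Handle == exact version
--         if "==" in line:
--             pkg, version = line.split("==", 1)
--         # Handle >=, <=, >, <, ~=, !=
--         elif ">=" in line:
--             pkg, version = line.split(">=", 1)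
--             version = f">={version}"
--         elif "<=" in line:
--             pkg, version = line.split("<=", 1)
--             version = f"<={version}"
--         elif ">" in line and not line.startswith(">"):  # Handle > but not >>
--             pkg, version = line.split(">", 1)
--             version = f">{version}"
--         elif "<" in line and not line.startswith("<"):  # Handle < but not <>
--             pkg, version = line.split("<", 1)
--             version = f"<{version}"
--         elif "~=" in line:  # Compatible release (~=)
--             pkg, version = line.split("~=", 1)
--             version = f"~={version}"
--         elif "!=" in line:  # Version exclusion (!=)
--             pkg, version = line.split("!=", 1)
--             version = f"!={version}"
--
--         # Clean up package name (remove any whitespace and extras [ ])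
--         pkg = pkg.split("[", 1)[0].strip()
--
--         if pkg:
--             deps.append({"name": pkg, "version": version})
--     return deps
-- ===== SOURCE B (Python) =====
-- _PRIORITY = ("==", ">=", "<=", ">", "<", "~=", "!=")
--
--
-- def _first_spec_positions(line):
--     """One left-to-right pass recording the first index of every specifier token."""
--     pos = {}
--     for i, c in enumerate(line):
--         if c in "=<>~!" and line[i + 1 : i + 2] == "=":
--             pos.setdefault(c + "=", i)
--         if c in "<>":
--             pos.setdefault(c, i)
--     return pos
--
--
-- def _split_line(line):
--     """Pick the highest-priority recorded token; bare '>'/'<' at index 0 do not count."""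
--     pos = _first_spec_positions(line)
--     for op in _PRIORITY:
--         i = pos.get(op)
--         if i is None or (len(op) == 1 and i == 0):
--             continue
--         version = line[i + len(op):]
--         return line[:i], version if op == "==" else op + version
--     return line, ""
--
--
-- def parse_requirements_txt(content):
--     deps = []
--     for raw in content.split("\n"):
--         line = raw.strip()
--         if not line or line.startswith(("#", "-r ")):
--             continue
--         line = line.split("#", 1)[0].strip()
--         pkg, version = _split_line(line)
--         pkg = pkg.split("[", 1)[0].strip()
--         if pkg:
--             deps.append({"name": pkg, "version": version})
--     return deps
-- ===== Notes on version B (the rewrite author's own statement) =====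
-- stated objective: alternative
-- what changed: Replaces A's seven if/elif branches (each doing its own substring search plus a split) by a single left-to-right character scan that records the first index of every specifier token in a dict, after which the chosen operator is picked by priority and the line is cut by index slicing instead of str.split.
import Mathlib
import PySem

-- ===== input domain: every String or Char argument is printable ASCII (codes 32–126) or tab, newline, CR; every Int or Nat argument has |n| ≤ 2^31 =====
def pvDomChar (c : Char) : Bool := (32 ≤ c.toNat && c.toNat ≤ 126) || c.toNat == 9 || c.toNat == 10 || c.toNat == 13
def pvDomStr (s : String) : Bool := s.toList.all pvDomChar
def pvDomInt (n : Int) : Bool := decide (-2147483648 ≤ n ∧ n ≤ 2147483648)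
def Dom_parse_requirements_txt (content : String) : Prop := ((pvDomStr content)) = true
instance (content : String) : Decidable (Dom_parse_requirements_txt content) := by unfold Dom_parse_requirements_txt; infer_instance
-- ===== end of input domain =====

-- B replaces A's seven substring-search-plus-split branches by ONE left-to-right character
-- scan that records the first index of every specifier token in a dict, then picks the
-- operator by priority and cuts the line by index slicing (objective: alternative algorithm).

-- ===== PORT A =====
-- the if/elif version-specifier cascade of A, transliterated branch for branch
def pvCascade (line : String) : String × String :=
  if PySem.Str.isIn "==" line then
    let parts := (PySem.Str.splitMax? line "==" 1).getD []
    (parts.getD 0 "", parts.getD 1 "")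
  else if PySem.Str.isIn ">=" line then
    let parts := (PySem.Str.splitMax? line ">=" 1).getD []
    (parts.getD 0 "", ">=" ++ parts.getD 1 "")
  else if PySem.Str.isIn "<=" line then
    let parts := (PySem.Str.splitMax? line "<=" 1).getD []
    (parts.getD 0 "", "<=" ++ parts.getD 1 "")
  else if PySem.Str.isIn ">" line && !PySem.Str.startswith line ">" then
    let parts := (PySem.Str.splitMax? line ">" 1).getD []
    (parts.getD 0 "", ">" ++ parts.getD 1 "")
  else if PySem.Str.isIn "<" line && !PySem.Str.startswith line "<" then
    let parts := (PySem.Str.splitMax? line "<" 1).getD []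
    (parts.getD 0 "", "<" ++ parts.getD 1 "")
  else if PySem.Str.isIn "~=" line then
    let parts := (PySem.Str.splitMax? line "~=" 1).getD []
    (parts.getD 0 "", "~=" ++ parts.getD 1 "")
  else if PySem.Str.isIn "!=" line then
    let parts := (PySem.Str.splitMax? line "!=" 1).getD []
    (parts.getD 0 "", "!=" ++ parts.getD 1 "")
  else (line, "")

-- loop body of A's 'for line in content.split("\n")', transliterated step for step
def pvStepA (deps : List (List (String × String))) (line0 : String) :
    List (List (String × String)) :=
  let line := PySem.Str.strip line0
  if line = "" || PySem.Str.startswith line "#" then deps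
  else if PySem.Str.startswith line "-r " then deps
  else
    let line := PySem.Str.strip (((PySem.Str.splitMax? line "#" 1).getD []).getD 0 "")
    if line = "" then deps
    else
      let pv := pvCascade line
      let pkg := PySem.Str.strip (((PySem.Str.splitMax? pv.1 "[" 1).getD []).getD 0 "")
      if pkg = "" then deps
      else deps ++ [[("name", pkg), ("version", pv.2)]]

def parse_requirements_txt (content : String) : List (List (String × String)) :=
  ((PySem.Str.split? content "\n").getD []).foldl pvStepA []

-- ===== PORT B =====
-- one enumerate step of _first_spec_positions: 'c in "=<>~!"' / 'c in "<>"' are ported as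
-- membership of the character in the pattern's characters (exact for a 1-char string), and
-- 'c + "="' as String.ofList [c, '='] (exact 1-char concatenation)
def pvScanStep (line : String) (d : PySem.Dict String Int) (ic : Int × Char) :
    PySem.Dict String Int :=
  let i := ic.1
  let c := ic.2
  let d :=
    if ("=<>~!".toList.contains c)
        && (PySem.Str.slice line (some (i + 1)) (some (i + 2)) == "=") then
      d.setdefault (String.ofList [c, '=']) i
    else d
  if "<>".toList.contains c then d.setdefault (String.ofList [c]) i else d

def pvFirstSpecPositions (line : String) : PySem.Dict String Int :=
  (PySem.List.enumerate line.toList).foldl (pvScanStep line) PySem.Dict.empty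

-- the 'for op in _PRIORITY' loop of _split_line
def pvTryOps (line : String) (pos : PySem.Dict String Int) : List String → String × String
  | [] => (line, "")
  | op :: rest =>
    match pos.get? op with
    | none => pvTryOps line pos rest
    | some i =>
      if PySem.Str.len op == 1 && i == 0 then pvTryOps line pos rest
      else
        let version := PySem.Str.slice line (some (i + PySem.Str.len op)) none
        (PySem.Str.slice line none (some i),
         if op == "==" then version else op ++ version)

def pvSplitLine (line : String) : String × String :=
  pvTryOps line (pvFirstSpecPositions line) ["==", ">=", "<=", ">", "<", "~=", "!="]

-- loop body of B's 'for raw in content.split("\n")'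
def pvStepB (deps : List (List (String × String))) (raw : String) :
    List (List (String × String)) :=
  let line := PySem.Str.strip raw
  if line = "" || PySem.Str.startswith line "#" || PySem.Str.startswith line "-r " then deps
  else
    let line := PySem.Str.strip (((PySem.Str.splitMax? line "#" 1).getD []).getD 0 "")
    let pv := pvSplitLine line
    let pkg := PySem.Str.strip (((PySem.Str.splitMax? pv.1 "[" 1).getD []).getD 0 "")
    if pkg = "" then deps
    else deps ++ [[("name", pkg), ("version", pv.2)]]

def parse_requirements_txt_alt (content : String) : List (List (String × String)) :=
  ((PySem.Str.split? content "\n").getD []).foldl pvStepB []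

-- ===== PRECONDITION & SPEC =====
def Spec_parse_requirements_txt (content : String) (out : List (List (String × String))) : Prop := out = parse_requirements_txt_alt content
instance (content : String) (out : List (List (String × String))) : Decidable (Spec_parse_requirements_txt content out) := by unfold Spec_parse_requirements_txt; infer_instance

-- ===== CLAIM (what is proved, stated in full; the proofs are below) =====
def Claim_equal_parse_requirements_txt : Prop := ∀ (content : String), Dom_parse_requirements_txt content → Spec_parse_requirements_txt content (parse_requirements_txt content)

-- ===== LEMMAS AND PROOFS =====

-- index of the first occurrence of sep in l (the common spec both programs are reduced to)
def pvFirstOcc (sep : List Char) : List Char → Option Nat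
  | [] => none
  | c :: rest =>
    if sep.isPrefixOf (c :: rest) then some 0 else (pvFirstOcc sep rest).map (· + 1)

theorem pvFirstOcc_le {sep l : List Char} {i : Nat} (h : pvFirstOcc sep l = some i) :
    i ≤ l.length := by
  induction l generalizing i with
  | nil => simp [pvFirstOcc] at h
  | cons c rest ih =>
    rw [pvFirstOcc] at h
    split at h
    · simp at h; omega
    · rcases Option.map_eq_some_iff.mp h with ⟨j, hj, rfl⟩
      have := ih hj; simp; omega

theorem pvFirstOcc_none_iff {sep : List Char} (hs : sep ≠ []) (l : List Char) :
    pvFirstOcc sep l = none ↔ ∀ j, ¬ sep <+: l.drop j := by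
  induction l with
  | nil =>
    simp only [pvFirstOcc, true_iff]
    intro j hp
    exact hs (List.prefix_nil.mp (by simpa using hp))
  | cons c rest ih =>
    rw [pvFirstOcc]
    split
    next h =>
      simp only [reduceCtorEq, false_iff, not_forall, not_not]
      exact ⟨0, by simpa using h⟩
    next h =>
      rw [Option.map_eq_none_iff, ih]
      constructor
      · intro hall j
        cases j with
        | zero => simpa using h
        | succ j => simpa using hall j
      · intro hall j; simpa using hall (j+1)

theorem pvFirstOcc_zero_iff (sep : List Char) (l : List Char) :
    pvFirstOcc sep l = some 0 ↔ (l ≠ [] ∧ sep <+: l) := by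
  cases l with
  | nil => simp [pvFirstOcc]
  | cons c rest =>
    rw [pvFirstOcc]
    split
    next h => simpa using h
    next h =>
      simp only [Option.map_eq_some_iff, ne_eq, reduceCtorEq, not_false_iff, true_and]
      constructor
      · rintro ⟨j, hj, hj0⟩; simp at hj0
      · intro hp; exact absurd (by simpa using hp) h

theorem pvFirstOcc_prefix_drop {sep l : List Char} {i : Nat} (h : pvFirstOcc sep l = some i) :
    sep <+: l.drop i := by
  induction l generalizing i with
  | nil => simp [pvFirstOcc] at h
  | cons c rest ih =>
    rw [pvFirstOcc] at h
    split at h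
    next hp => simp at h; subst h; simpa using hp
    next hp =>
      rcases Option.map_eq_some_iff.mp h with ⟨j, hj, rfl⟩
      simpa using ih hj

theorem pvIsIn_eq_isSome {sep : List Char} (hs : sep ≠ []) (l : List Char) :
    PySem.Chars.isIn sep l = (pvFirstOcc sep l).isSome := by
  rcases h : pvFirstOcc sep l with _ | i
  · simp only [Option.isSome_none]
    rw [Bool.eq_false_iff]
    intro htrue
    rcases List.infix_iff_prefix_suffix.mp ((PySem.Chars.isIn_iff_infix sep l).mp htrue)
      with ⟨t, hpre, u, rfl⟩
    exact (pvFirstOcc_none_iff hs _).mp h u.length (by simpa [List.drop_left] using hpre)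
  · simp only [Option.isSome_some]
    rw [PySem.Chars.isIn_iff_infix]
    rcases pvFirstOcc_prefix_drop h with ⟨v, hv⟩
    exact ⟨l.take i, v, by rw [List.append_assoc, hv, List.take_append_drop]⟩


theorem pvGoZero (sep : List Char) (fuel : Nat) (l cur : List Char) (acc : List (List Char)) :
    PySem.Chars.splitOnMax.go sep fuel 0 l cur acc = ((cur.reverse ++ l) :: acc).reverse := by
  cases fuel with
  | zero => rw [PySem.Chars.splitOnMax.go]
  | succ f =>
    cases l with
    | nil => rw [PySem.Chars.splitOnMax.go]; simp; omega
    | cons c rest => rw [PySem.Chars.splitOnMax.go]; simp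

theorem pvGoOne (sep : List Char) (l : List Char) (fuel : Nat)
    (hf : l.length < fuel) (cur : List Char) (acc : List (List Char)) :
    PySem.Chars.splitOnMax.go sep fuel 1 l cur acc =
      match pvFirstOcc sep l with
      | some i => acc.reverse ++ [cur.reverse ++ l.take i, l.drop (i + sep.length)]
      | none => acc.reverse ++ [cur.reverse ++ l] := by
  induction l generalizing fuel cur acc with
  | nil =>
    cases fuel with
    | zero => omega
    | succ f => rw [PySem.Chars.splitOnMax.go]; simp [pvFirstOcc]; omega
  | cons c rest ih =>
    cases fuel with
    | zero => omega
    | succ f =>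
      rw [PySem.Chars.splitOnMax.go]
      simp only [if_false, one_ne_zero]
      rw [pvFirstOcc]
      split
      next hp =>
        rw [pvGoZero]
        simp
      next hp =>
        rw [ih f (by simpa using Nat.lt_of_succ_lt_succ hf) (c :: cur) acc]
        rcases pvFirstOcc sep rest with _ | i <;> simp
        rw [show i + 1 + sep.length = (i + sep.length) + 1 by omega]
        simp

theorem pvSplitOnMax_one (sep : List Char) (l : List Char) :
    PySem.Chars.splitOnMax l sep 1 =
      match pvFirstOcc sep l with
      | some i => [l.take i, l.drop (i + sep.length)]
      | none => [l] := by
  rw [PySem.Chars.splitOnMax]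
  norm_num
  rw [pvGoOne sep l (l.length + 1) (by omega) [] []]
  rcases pvFirstOcc sep l with _ | i <;> simp

theorem pvSliceTo (l : List Char) (i : Nat) (h : i ≤ l.length) :
    PySem.Chars.slice l none (some (i : Int)) = l.take i := by
  simp only [PySem.Chars.slice_eq_listSlice, PySem.List.slice, PySem.List.clampIdx]
  rw [if_neg (by omega)]
  simp only [Int.toNat_natCast]
  rw [min_eq_left h]
  simp

theorem pvSliceFrom (l : List Char) (a : Nat) :
    PySem.Chars.slice l (some (a : Int)) none = l.drop a := by
  simp only [PySem.Chars.slice_eq_listSlice, PySem.List.slice, PySem.List.clampIdx]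
  rw [if_neg (by omega)]
  simp only [Int.toNat_natCast]
  rcases le_total a l.length with h | h
  · rw [min_eq_left h]
    exact List.take_of_length_le (by simp)
  · rw [min_eq_right h]
    simp [List.drop_eq_nil_of_le h]

-- slice of a segment
theorem pvSliceSeg (l : List Char) (a b : Nat) (ha : a ≤ l.length) :
    PySem.Chars.slice l (some (a : Int)) (some (b : Int)) = (l.drop a).take (b - a) := by
  simp only [PySem.Chars.slice_eq_listSlice, PySem.List.slice, PySem.List.clampIdx]
  rw [if_neg (by omega), if_neg (by omega)]
  simp only [Int.toNat_natCast]
  rw [min_eq_left ha]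
  rcases le_total b l.length with h | h
  · rw [min_eq_left h]
  · rw [min_eq_right h]
    rw [List.take_of_length_le (by simp), List.take_of_length_le (by simp; omega)]

-- the lookahead slice line[i+1:i+2] seen from the decomposition drop k = c :: rest
theorem pvNextSlice (line : String) (k : Nat) (c : Char) (rest : List Char)
    (h : line.toList.drop k = c :: rest) :
    PySem.Str.slice line (some ((k : Int) + 1)) (some ((k : Int) + 2)) =
      String.ofList (rest.take 1) := by
  have hk : k < line.toList.length := by
    by_contra hk
    rw [List.drop_eq_nil_of_le (by omega)] at h
    exact (List.cons_ne_nil _ _) h.symm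
  have h1 : line.toList.drop (k + 1) = rest := by
    have := congrArg (List.drop 1) h
    simpa [List.drop_drop, Nat.add_comm] using this
  rw [PySem.Str.slice]
  rw [show ((k : Int) + 1) = ((k + 1 : Nat) : Int) by push_cast; ring,
      show ((k : Int) + 2) = ((k + 2 : Nat) : Int) by push_cast; ring]
  rw [pvSliceSeg line.toList (k+1) (k+2) (by omega), h1]
  rw [show k + 2 - (k + 1) = 1 by omega]

theorem pvOfList_ne {cs ds : List Char} (h : cs ≠ ds) :
    String.ofList cs ≠ String.ofList ds := by
  intro he; exact h (by simpa using congrArg String.toList he)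

theorem pvTake1Eq (rest : List Char) :
    (String.ofList (rest.take 1) == "=") = ['='].isPrefixOf rest := by
  cases rest with
  | nil => decide
  | cons r rs =>
    by_cases hr : r = '='
    · subst hr; simp [List.isPrefixOf]
    · have h1 : String.ofList [r] ≠ "=" := pvOfList_ne (by simpa using hr)
      simp [List.isPrefixOf, h1]
      exact fun he => hr he.symm

-- effect of one scan step on a two-char key "x="
theorem pvStepGetTwo (line : String) (k : Nat) (c : Char) (rest : List Char)
    (h : line.toList.drop k = c :: rest) (d : PySem.Dict String Int) (x : Char)
    (hx : ("=<>~!".toList.contains x) = true) :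
    (pvScanStep line d ((k : Int), c)).get? (String.ofList [x, '=']) =
      if [x, '='].isPrefixOf (c :: rest) then
        some ((d.get? (String.ofList [x, '='])).getD (k : Int))
      else d.get? (String.ofList [x, '=']) := by
  unfold pvScanStep
  simp only [pvNextSlice line k c rest h, pvTake1Eq]
  by_cases hc : c = x
  · subst hc
    have hne1 : String.ofList [c, '='] ≠ String.ofList [c] := pvOfList_ne (by simp)
    by_cases hr : ['='].isPrefixOf rest
    · simp only [hx, hr, List.isPrefixOf_cons₂, BEq.rfl, Bool.true_and, Bool.and_true,
        Bool.and_self, if_true, reduceIte]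
      split
      · rw [PySem.Dict.get?_setdefault_of_ne _ _ hne1, PySem.Dict.get?_setdefault_self]
      · rw [PySem.Dict.get?_setdefault_self]
    · simp only [hx, Bool.eq_false_iff.mpr hr, List.isPrefixOf_cons₂, BEq.rfl,
        Bool.true_and, Bool.and_false, Bool.false_eq_true, if_false, reduceIte]
      split
      · rw [PySem.Dict.get?_setdefault_of_ne _ _ hne1]
      · rfl
  · have h1 : String.ofList [x, '='] ≠ String.ofList [c, '='] :=
      pvOfList_ne (by simp; exact fun he => hc he.symm)
    have h2 : String.ofList [x, '='] ≠ String.ofList [c] := pvOfList_ne (by simp)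
    have hpre : ([x, '='].isPrefixOf (c :: rest)) = false := by
      simp [List.isPrefixOf_cons₂]
      exact fun he => absurd he.symm hc
    rw [hpre]
    simp only [Bool.false_eq_true, if_false]
    split
    · split
      · rw [PySem.Dict.get?_setdefault_of_ne _ _ h2, PySem.Dict.get?_setdefault_of_ne _ _ h1]
      · rw [PySem.Dict.get?_setdefault_of_ne _ _ h2]
    · split
      · rw [PySem.Dict.get?_setdefault_of_ne _ _ h1]
      · rfl

-- effect of one scan step on a one-char key "x" (x ∈ "<>")
theorem pvStepGetOne (line : String) (k : Nat) (c : Char) (rest : List Char)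
    (h : line.toList.drop k = c :: rest) (d : PySem.Dict String Int) (x : Char)
    (hx : ("<>".toList.contains x) = true) :
    (pvScanStep line d ((k : Int), c)).get? (String.ofList [x]) =
      if [x].isPrefixOf (c :: rest) then
        some ((d.get? (String.ofList [x])).getD (k : Int))
      else d.get? (String.ofList [x]) := by
  unfold pvScanStep
  by_cases hc : c = x
  · subst hc
    have hne1 : String.ofList [c] ≠ String.ofList [c, '='] := pvOfList_ne (by simp)
    simp only [hx, List.isPrefixOf_cons₂, BEq.rfl, List.isPrefixOf_nil_left, Bool.and_true,
      if_true, reduceIte]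
    split
    · rw [PySem.Dict.get?_setdefault_self, PySem.Dict.get?_setdefault_of_ne _ _ hne1]
    · rw [PySem.Dict.get?_setdefault_self]
  · have h1 : String.ofList [x] ≠ String.ofList [c, '='] := pvOfList_ne (by simp)
    have h2 : String.ofList [x] ≠ String.ofList [c] := pvOfList_ne (by simpa using Ne.symm hc)
    have hpre : ([x].isPrefixOf (c :: rest)) = false := by
      simp [List.isPrefixOf_cons₂]
      exact fun he => absurd he.symm hc
    rw [hpre]
    simp only [Bool.false_eq_true, if_false]
    split
    · split
      · rw [PySem.Dict.get?_setdefault_of_ne _ _ h2, PySem.Dict.get?_setdefault_of_ne _ _ h1]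
      · rw [PySem.Dict.get?_setdefault_of_ne _ _ h2]
    · split
      · rw [PySem.Dict.get?_setdefault_of_ne _ _ h1]
      · rfl

theorem pvEnumFold (line : String) (key : String)
    (hstep : ∀ (k : Nat) (c : Char) (rest : List Char) (d : PySem.Dict String Int),
        line.toList.drop k = c :: rest →
        (pvScanStep line d ((k : Int), c)).get? key =
          if key.toList.isPrefixOf (c :: rest) then some ((d.get? key).getD (k : Int))
          else d.get? key) :
    ∀ (suf : List Char) (k : Nat), line.toList.drop k = suf →
      ∀ (d : PySem.Dict String Int),
        ((PySem.List.enumerate suf (k : Int)).foldl (pvScanStep line) d).get? key =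
          (d.get? key).or ((pvFirstOcc key.toList suf).map (fun n => ((k + n : Nat) : Int))) := by
  intro suf
  induction suf with
  | nil => intro k h d; simp [PySem.List.enumerate, pvFirstOcc]
  | cons c rest ih =>
    intro k h d
    have hdrop : line.toList.drop (k + 1) = rest := by
      have := congrArg (List.drop 1) h
      simpa [List.drop_drop, Nat.add_comm] using this
    rw [show PySem.List.enumerate (c :: rest) (k : Int)
          = ((k : Int), c) :: PySem.List.enumerate rest ((k : Int) + 1) from rfl]
    rw [List.foldl_cons]
    rw [show ((k : Int) + 1) = ((k + 1 : Nat) : Int) by push_cast; ring]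
    rw [ih (k + 1) hdrop (pvScanStep line d ((k : Int), c))]
    rw [hstep k c rest d h]
    rw [pvFirstOcc]
    by_cases hp : key.toList.isPrefixOf (c :: rest)
    · simp only [hp, if_true, reduceIte]
      cases hget : d.get? key <;> simp [hget]
    · simp only [Bool.eq_false_iff.mpr hp, Bool.false_eq_true, if_false]
      cases hget : d.get? key
      · cases hocc : pvFirstOcc key.toList rest <;> simp [hget, hocc]
        omega
      · simp [hget]

theorem pvScan_get (line : String) (op : String)
    (hop : op ∈ (["==", ">=", "<=", ">", "<", "~=", "!="] : List String)) :
    (pvFirstSpecPositions line).get? op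
      = (pvFirstOcc op.toList line.toList).map (fun n => (n : Int)) := by
  have hrun : ∀ (key : String),
      (∀ (k : Nat) (c : Char) (rest : List Char) (d : PySem.Dict String Int),
        line.toList.drop k = c :: rest →
        (pvScanStep line d ((k : Int), c)).get? key =
          if key.toList.isPrefixOf (c :: rest) then some ((d.get? key).getD (k : Int))
          else d.get? key) →
      (pvFirstSpecPositions line).get? key
        = (pvFirstOcc key.toList line.toList).map (fun n => (n : Int)) := by
    intro key hstep
    unfold pvFirstSpecPositions
    have h0 : line.toList.drop 0 = line.toList := by simp
    have := pvEnumFold line key hstep line.toList 0 h0 PySem.Dict.empty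
    rw [show PySem.List.enumerate line.toList
          = PySem.List.enumerate line.toList ((0 : Nat) : Int) by norm_num] at *
    rw [this]
    simp
    rcases pvFirstOcc key.toList line.toList with _ | n <;> simp
  fin_cases hop
  · exact hrun "==" (fun k c rest d h => pvStepGetTwo line k c rest h d '=' (by decide))
  · exact hrun ">=" (fun k c rest d h => pvStepGetTwo line k c rest h d '>' (by decide))
  · exact hrun "<=" (fun k c rest d h => pvStepGetTwo line k c rest h d '<' (by decide))
  · exact hrun ">" (fun k c rest d h => pvStepGetOne line k c rest h d '>' (by decide))
  · exact hrun "<" (fun k c rest d h => pvStepGetOne line k c rest h d '<' (by decide))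
  · exact hrun "~=" (fun k c rest d h => pvStepGetTwo line k c rest h d '~' (by decide))
  · exact hrun "!=" (fun k c rest d h => pvStepGetTwo line k c rest h d '!' (by decide))

-- two-char-branch agreement: A's 'op in line' + split(op,1) vs B's table lookup + slicing
theorem pvBranchTwo (line : String) (op : String) (x y : Char)
    (hxy : op.toList = [x, y]) (i : Nat)
    (h1 : pvFirstOcc [x, y] line.toList = some i) :
    ((PySem.Str.splitMax? line op 1).getD []).getD 0 ""
        = PySem.Str.slice line none (some ((i : Nat) : Int))
      ∧ ((PySem.Str.splitMax? line op 1).getD []).getD 1 ""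
        = PySem.Str.slice line (some (((i : Nat) : Int) + PySem.Str.len op)) none := by
  have hle : i ≤ line.toList.length := pvFirstOcc_le h1
  rw [PySem.Str.splitMax?, PySem.Chars.splitMax?]
  rw [if_neg (by simp [hxy])]
  rw [hxy, pvSplitOnMax_one [x, y] line.toList, h1]
  rw [PySem.Str.slice, PySem.Str.slice, pvSliceTo _ _ hle]
  rw [PySem.Str.len, hxy]
  rw [show ((i : Int) + ((([x, y] : List Char).length : Nat) : Int)) = ((i + 2 : Nat) : Int) by
        push_cast; norm_num]
  rw [pvSliceFrom]
  constructor <;> rfl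

theorem pvBranchOne (line : String) (op : String) (x : Char)
    (hx : op.toList = [x]) (i : Nat)
    (h1 : pvFirstOcc [x] line.toList = some i) :
    ((PySem.Str.splitMax? line op 1).getD []).getD 0 ""
        = PySem.Str.slice line none (some ((i : Nat) : Int))
      ∧ ((PySem.Str.splitMax? line op 1).getD []).getD 1 ""
        = PySem.Str.slice line (some (((i : Nat) : Int) + PySem.Str.len op)) none := by
  have hle : i ≤ line.toList.length := pvFirstOcc_le h1
  rw [PySem.Str.splitMax?, PySem.Chars.splitMax?]
  rw [if_neg (by simp [hx])]
  rw [hx, pvSplitOnMax_one [x] line.toList, h1]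
  rw [PySem.Str.slice, PySem.Str.slice, pvSliceTo _ _ hle]
  rw [PySem.Str.len, hx]
  rw [show ((i : Int) + ((([x] : List Char).length : Nat) : Int)) = ((i + 1 : Nat) : Int) by
        push_cast; norm_num]
  rw [pvSliceFrom]
  constructor <;> rfl

theorem pvStartswith_false (line op : String) {i : Nat}
    (h : pvFirstOcc op.toList line.toList = some i) (hz : i ≠ 0) :
    PySem.Str.startswith line op = false := by
  rw [Bool.eq_false_iff]
  intro htrue
  have hpre : op.toList <+: line.toList := (PySem.Chars.startswith_iff _ _).mp htrue
  have hne : line.toList ≠ [] := by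
    intro hnil; rw [hnil] at h; simp [pvFirstOcc] at h
  have h0 := (pvFirstOcc_zero_iff op.toList line.toList).mpr ⟨hne, hpre⟩
  rw [h] at h0
  exact hz (by simpa using h0)

theorem pvStartswith_true (line op : String)
    (h : pvFirstOcc op.toList line.toList = some 0) :
    PySem.Str.startswith line op = true :=
  (PySem.Chars.startswith_iff _ _).mpr ((pvFirstOcc_zero_iff op.toList line.toList).mp h).2

theorem pvIsInStr (line op : String) (hop : op.toList ≠ []) :
    PySem.Str.isIn op line = (pvFirstOcc op.toList line.toList).isSome :=
  pvIsIn_eq_isSome hop line.toList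

-- A's cascade, cut into its suffixes (definitionally subterms of pvCascade)
def pvA7 (line : String) : String × String :=
  if PySem.Str.isIn "!=" line then
    let parts := (PySem.Str.splitMax? line "!=" 1).getD []
    (parts.getD 0 "", "!=" ++ parts.getD 1 "")
  else (line, "")

def pvA6 (line : String) : String × String :=
  if PySem.Str.isIn "~=" line then
    let parts := (PySem.Str.splitMax? line "~=" 1).getD []
    (parts.getD 0 "", "~=" ++ parts.getD 1 "")
  else pvA7 line

def pvA5 (line : String) : String × String :=
  if PySem.Str.isIn "<" line && !PySem.Str.startswith line "<" then
    let parts := (PySem.Str.splitMax? line "<" 1).getD []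
    (parts.getD 0 "", "<" ++ parts.getD 1 "")
  else pvA6 line

def pvA4 (line : String) : String × String :=
  if PySem.Str.isIn ">" line && !PySem.Str.startswith line ">" then
    let parts := (PySem.Str.splitMax? line ">" 1).getD []
    (parts.getD 0 "", ">" ++ parts.getD 1 "")
  else pvA5 line

def pvA3 (line : String) : String × String :=
  if PySem.Str.isIn "<=" line then
    let parts := (PySem.Str.splitMax? line "<=" 1).getD []
    (parts.getD 0 "", "<=" ++ parts.getD 1 "")
  else pvA4 line

def pvA2 (line : String) : String × String :=
  if PySem.Str.isIn ">=" line then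
    let parts := (PySem.Str.splitMax? line ">=" 1).getD []
    (parts.getD 0 "", ">=" ++ parts.getD 1 "")
  else pvA3 line

def pvA1 (line : String) : String × String :=
  if PySem.Str.isIn "==" line then
    let parts := (PySem.Str.splitMax? line "==" 1).getD []
    (parts.getD 0 "", parts.getD 1 "")
  else pvA2 line

theorem pvCascade_eq_pvA1 (line : String) : pvCascade line = pvA1 line := rfl

theorem pvA7_eq (line : String) :
    pvTryOps line (pvFirstSpecPositions line) ["!="] = pvA7 line := by
  unfold pvA7
  rw [pvTryOps]
  rw [pvScan_get line "!=" (by decide), pvIsInStr line "!=" (by decide)]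
  rcases h : pvFirstOcc "!=".toList line.toList with _ | i
  · simp only [h, Option.pure_def, Option.bind_eq_bind, Option.bind_none, Option.map_none, Option.isSome_none, Bool.false_eq_true,
      if_false]
    rfl
  · obtain ⟨ha0, ha1⟩ := pvBranchTwo line "!=" '!' '=' rfl i h
    simp only [h, Option.pure_def, Option.bind_eq_bind, Option.bind_some, Option.map_some, Option.isSome_some, if_true, reduceIte]
    rw [List.getD_eq_getElem?_getD] at ha0 ha1
    simp [ha0, ha1]

theorem pvA6_eq (line : String) :
    pvTryOps line (pvFirstSpecPositions line) ["~=", "!="] = pvA6 line := by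
  unfold pvA6
  rw [pvTryOps]
  rw [pvScan_get line "~=" (by decide), pvIsInStr line "~=" (by decide)]
  rcases h : pvFirstOcc "~=".toList line.toList with _ | i
  · simp only [h, Option.pure_def, Option.bind_eq_bind, Option.bind_none, Option.map_none, Option.isSome_none, Bool.false_eq_true,
      if_false]
    exact pvA7_eq line
  · obtain ⟨ha0, ha1⟩ := pvBranchTwo line "~=" '~' '=' rfl i h
    simp only [h, Option.pure_def, Option.bind_eq_bind, Option.bind_some, Option.map_some, Option.isSome_some, if_true, reduceIte]
    rw [List.getD_eq_getElem?_getD] at ha0 ha1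
    simp [ha0, ha1]

theorem pvA5_eq (line : String) :
    pvTryOps line (pvFirstSpecPositions line) ["<", "~=", "!="] = pvA5 line := by
  unfold pvA5
  rw [pvTryOps]
  rw [pvScan_get line "<" (by decide), pvIsInStr line "<" (by decide)]
  rcases h : pvFirstOcc "<".toList line.toList with _ | i
  · simp only [h, Option.pure_def, Option.bind_eq_bind, Option.bind_none, Option.map_none, Option.isSome_none, Bool.false_eq_true,
      Bool.false_and, if_false]
    exact pvA6_eq line
  · by_cases hz : i = 0
    · subst hz
      rw [pvStartswith_true line "<" h]
      simp only [h, Option.pure_def, Option.bind_eq_bind, Option.bind_some, Option.map_some, Option.isSome_some, Bool.not_true,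
        Bool.and_false, Bool.false_eq_true, if_false]
      rw [if_pos (by decide)]
      exact pvA6_eq line
    · obtain ⟨ha0, ha1⟩ := pvBranchOne line "<" '<' rfl i h
      rw [pvStartswith_false line "<" h hz]
      have hiz : (((i : Nat) : Int) == 0) = false := by simpa using hz
      simp only [h, Option.pure_def, Option.bind_eq_bind, Option.bind_some, Option.map_some, Option.isSome_some, Bool.not_false,
        Bool.and_true, if_true, reduceIte, hiz, Bool.and_false, Bool.false_eq_true, if_false]
      rw [List.getD_eq_getElem?_getD] at ha0 ha1
      simp [ha0, ha1]

theorem pvA4_eq (line : String) :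
    pvTryOps line (pvFirstSpecPositions line) [">", "<", "~=", "!="] = pvA4 line := by
  unfold pvA4
  rw [pvTryOps]
  rw [pvScan_get line ">" (by decide), pvIsInStr line ">" (by decide)]
  rcases h : pvFirstOcc ">".toList line.toList with _ | i
  · simp only [h, Option.pure_def, Option.bind_eq_bind, Option.bind_none, Option.map_none, Option.isSome_none, Bool.false_eq_true,
      Bool.false_and, if_false]
    exact pvA5_eq line
  · by_cases hz : i = 0
    · subst hz
      rw [pvStartswith_true line ">" h]
      simp only [h, Option.pure_def, Option.bind_eq_bind, Option.bind_some, Option.map_some, Option.isSome_some, Bool.not_true,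
        Bool.and_false, Bool.false_eq_true, if_false]
      rw [if_pos (by decide)]
      exact pvA5_eq line
    · obtain ⟨ha0, ha1⟩ := pvBranchOne line ">" '>' rfl i h
      rw [pvStartswith_false line ">" h hz]
      have hiz : (((i : Nat) : Int) == 0) = false := by simpa using hz
      simp only [h, Option.pure_def, Option.bind_eq_bind, Option.bind_some, Option.map_some, Option.isSome_some, Bool.not_false,
        Bool.and_true, if_true, reduceIte, hiz, Bool.and_false, Bool.false_eq_true, if_false]
      rw [List.getD_eq_getElem?_getD] at ha0 ha1
      simp [ha0, ha1]

theorem pvA3_eq (line : String) :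
    pvTryOps line (pvFirstSpecPositions line) ["<=", ">", "<", "~=", "!="] = pvA3 line := by
  unfold pvA3
  rw [pvTryOps]
  rw [pvScan_get line "<=" (by decide), pvIsInStr line "<=" (by decide)]
  rcases h : pvFirstOcc "<=".toList line.toList with _ | i
  · simp only [h, Option.pure_def, Option.bind_eq_bind, Option.bind_none, Option.map_none, Option.isSome_none, Bool.false_eq_true,
      if_false]
    exact pvA4_eq line
  · obtain ⟨ha0, ha1⟩ := pvBranchTwo line "<=" '<' '=' rfl i h
    simp only [h, Option.pure_def, Option.bind_eq_bind, Option.bind_some, Option.map_some, Option.isSome_some, if_true, reduceIte]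
    rw [List.getD_eq_getElem?_getD] at ha0 ha1
    simp [ha0, ha1]

theorem pvA2_eq (line : String) :
    pvTryOps line (pvFirstSpecPositions line) [">=", "<=", ">", "<", "~=", "!="] = pvA2 line := by
  unfold pvA2
  rw [pvTryOps]
  rw [pvScan_get line ">=" (by decide), pvIsInStr line ">=" (by decide)]
  rcases h : pvFirstOcc ">=".toList line.toList with _ | i
  · simp only [h, Option.pure_def, Option.bind_eq_bind, Option.bind_none, Option.map_none, Option.isSome_none, Bool.false_eq_true,
      if_false]
    exact pvA3_eq line
  · obtain ⟨ha0, ha1⟩ := pvBranchTwo line ">=" '>' '=' rfl i h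
    simp only [h, Option.pure_def, Option.bind_eq_bind, Option.bind_some, Option.map_some, Option.isSome_some, if_true, reduceIte]
    rw [List.getD_eq_getElem?_getD] at ha0 ha1
    simp [ha0, ha1]

theorem pvA1_eq (line : String) :
    pvTryOps line (pvFirstSpecPositions line) ["==", ">=", "<=", ">", "<", "~=", "!="] = pvA1 line := by
  unfold pvA1
  rw [pvTryOps]
  rw [pvScan_get line "==" (by decide), pvIsInStr line "==" (by decide)]
  rcases h : pvFirstOcc "==".toList line.toList with _ | i
  · simp only [h, Option.pure_def, Option.bind_eq_bind, Option.bind_none, Option.map_none, Option.isSome_none, Bool.false_eq_true,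
      if_false]
    exact pvA2_eq line
  · obtain ⟨ha0, ha1⟩ := pvBranchTwo line "==" '=' '=' rfl i h
    simp only [h, Option.pure_def, Option.bind_eq_bind, Option.bind_some, Option.map_some, Option.isSome_some, if_true, reduceIte]
    rw [List.getD_eq_getElem?_getD] at ha0 ha1
    simp [ha0, ha1]

theorem pvSplitLine_eq (line : String) : pvSplitLine line = pvCascade line := by
  rw [pvCascade_eq_pvA1]
  exact pvA1_eq line

theorem pvStep_eq (deps : List (List (String × String))) (raw : String) :
    pvStepB deps raw = pvStepA deps raw := by
  unfold pvStepA pvStepB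
  simp only [pvSplitLine_eq]
  by_cases h1 : PySem.Str.strip raw = ""
  · simp only [h1, decide_true, Bool.true_or, reduceIte]
  by_cases h2 : PySem.Str.startswith (PySem.Str.strip raw) "#" = true
  · simp only [h2, Bool.or_true, Bool.true_or, reduceIte]
  have h2b := Bool.eq_false_iff.mpr h2
  by_cases h3 : PySem.Str.startswith (PySem.Str.strip raw) "-r " = true
  · simp only [decide_eq_false h1, h2b, h3, Bool.false_or, Bool.or_true, reduceIte, ite_self]
  have h3b := Bool.eq_false_iff.mpr h3
  simp only [decide_eq_false h1, h2b, h3b, Bool.or_false, Bool.false_eq_true, if_false]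
  by_cases hl : PySem.Str.strip (((PySem.Str.splitMax? (PySem.Str.strip raw) "#" 1).getD []).getD 0 "") = ""
  · have hempty : PySem.Str.strip (((PySem.Str.splitMax? (pvCascade "").1 "[" 1).getD []).getD 0 "") = "" := rfl
    simp only [hl, hempty, reduceIte, if_pos rfl]
  · simp only [if_neg hl]

-- ===== VERDICT (by name: the statement is the Claim_ definition above) =====
theorem parse_requirements_txt_spec : Claim_equal_parse_requirements_txt := by
  intro content _
  unfold Spec_parse_requirements_txt parse_requirements_txt parse_requirements_txt_alt
  have h : pvStepB = pvStepA := funext fun d => funext fun r => pvStep_eq d r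
  rw [h]
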